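-- pv_equiv track=rewrite | github.com/xuankypham/Nikobot_Project2025 | Python_App_PC/function.py | arrage_2array_increase
-- ===== SOURCE A (Python) =====
-- def find_min(marks):
--
--     minimum_val = marks[0]
--     for i in range(1, len(marks)):
--         if (marks[i] < minimum_val):
--             minimum_val = marks[i]
--     result = marks.index(minimum_val)
--     return result,minimum_val
--
-- def arrage_2array_increase(arr_deg,arr_dist):
--     new_array_deg = []  #
--     new_array_dist = []  # distance
--     array_temp = arr_deg.copy()
--     arr_dist_temp = arr_dist.copy()
--
--     for i in range(len(array_temp)):
--         index, minval = find_min(array_temp)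
--         new_array_deg.append(array_temp[index])
--         array_temp.pop(index)
--
--         new_array_dist.append(arr_dist_temp[index])
--         arr_dist_temp.pop(index)
--     return new_array_deg,new_array_dist
-- ===== SOURCE B (Python) =====
-- def arrage_2array_increase(arr_deg, arr_dist):
--     order = sorted(range(len(arr_deg)), key=lambda i: arr_deg[i])
--     new_array_deg = [arr_deg[i] for i in order]
--     new_array_dist = [arr_dist[i] for i in order]
--     return new_array_deg, new_array_dist
-- ===== Notes on version B (the rewrite author's own statement) =====
-- stated objective: faster
-- what changed: Replaces the quadratic repeated min-scan-and-pop with one stable sort of the index list followed by a single gather pass over both arrays.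
import Mathlib
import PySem

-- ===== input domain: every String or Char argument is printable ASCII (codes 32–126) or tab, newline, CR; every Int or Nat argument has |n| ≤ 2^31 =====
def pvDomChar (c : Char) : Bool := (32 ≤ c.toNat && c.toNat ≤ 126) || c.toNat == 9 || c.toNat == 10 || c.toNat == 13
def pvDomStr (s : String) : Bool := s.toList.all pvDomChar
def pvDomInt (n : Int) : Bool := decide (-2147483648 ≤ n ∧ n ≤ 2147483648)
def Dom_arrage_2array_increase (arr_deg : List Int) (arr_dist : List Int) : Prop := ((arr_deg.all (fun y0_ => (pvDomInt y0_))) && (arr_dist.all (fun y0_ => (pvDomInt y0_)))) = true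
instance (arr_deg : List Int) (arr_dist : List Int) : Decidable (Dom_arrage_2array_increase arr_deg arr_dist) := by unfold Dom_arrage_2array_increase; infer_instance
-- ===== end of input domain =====

-- B replaces A's quadratic repeated min-scan-and-pop by one stable sort of the index
-- list followed by a single gather pass over both arrays (objective: faster).

-- ===== PORT A =====
-- find_min(marks): min value by a linear scan, then marks.index of it (first occurrence).
def find_min (marks : List Int) : Option (Int × Int) :=
  match PySem.List.pyGet? marks 0 with
  | none => none   -- marks[0] raises IndexError on []
  | some m0 =>
    let minv := (PySem.List.pyRange 1 (marks.length : Int) 1).foldl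
      (fun mv i => if PySem.List.pyGetD marks i 0 < mv then PySem.List.pyGetD marks i 0 else mv) m0
    match PySem.List.index? marks minv with
    | none => none   -- unreachable: minv ∈ marks
    | some r => some ((r : Int), minv)

-- the 'for i in range(len(array_temp))' loop of A, fuel = initial length
def loopA (fuel : Nat) (nd ns td ts : List Int) : List Int × List Int :=
  match fuel with
  | 0 => (nd, ns)
  | fuel + 1 =>
    match find_min td with
    | none => (nd, ns)   -- IndexError region, outside Pre_
    | some (idx, _) =>
      match PySem.List.pyGet? td idx, PySem.List.pop? td idx with
      | some a, some (_, td') =>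
        match PySem.List.pyGet? ts idx, PySem.List.pop? ts idx with
        | some b, some (_, ts') => loopA fuel (nd ++ [a]) (ns ++ [b]) td' ts'
        | _, _ => (nd ++ [a], ns)   -- IndexError on arr_dist_temp, outside Pre_
      | _, _ => (nd, ns)   -- unreachable

def arrage_2array_increase (arr_deg : List Int) (arr_dist : List Int) : List Int × List Int :=
  loopA arr_deg.length [] [] arr_deg arr_dist

-- ===== PORT B =====
def arrage_2array_increase_alt (arr_deg : List Int) (arr_dist : List Int) : List Int × List Int :=
  let order := PySem.List.sorted (PySem.List.pyRange 0 (arr_deg.length : Int) 1)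
    (fun i => PySem.List.pyGetD arr_deg i 0) false
  (order.map (fun i => PySem.List.pyGetD arr_deg i 0),
   order.map (fun i => PySem.List.pyGetD arr_dist i 0))

-- ===== PRECONDITION & SPEC =====
-- A raises IndexError (on arr_dist_temp) exactly when arr_deg is longer than arr_dist.
def Pre_arrage_2array_increase (arr_deg : List Int) (arr_dist : List Int) : Prop :=
  arr_deg.length ≤ arr_dist.length
instance (arr_deg : List Int) (arr_dist : List Int) : Decidable (Pre_arrage_2array_increase arr_deg arr_dist) := by unfold Pre_arrage_2array_increase; infer_instance

def pvWitness_arrage_2array_increase : List Int × List Int := ([3, 1, 2, 1], [10, 20, 30, 40])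

def Spec_arrage_2array_increase (arr_deg : List Int) (arr_dist : List Int) (out : List Int × List Int) : Prop := out = arrage_2array_increase_alt arr_deg arr_dist
instance (arr_deg : List Int) (arr_dist : List Int) (out : List Int × List Int) : Decidable (Spec_arrage_2array_increase arr_deg arr_dist out) := by unfold Spec_arrage_2array_increase; infer_instance

-- ===== CLAIM (what is proved, stated in full; the proofs are below) =====
def Claim_equal_arrage_2array_increase : Prop := ∀ (arr_deg : List Int) (arr_dist : List Int), Dom_arrage_2array_increase arr_deg arr_dist → Pre_arrage_2array_increase arr_deg arr_dist → Spec_arrage_2array_increase arr_deg arr_dist (arrage_2array_increase arr_deg arr_dist)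

-- ===== LEMMAS AND PROOFS =====

def selList (key : Int → Int) : Nat → List Int → List Int
  | 0, _ => []
  | fuel + 1, R =>
    match find_min (R.map key) with
    | none => []
    | some (p, _) =>
      match PySem.List.pop? R p with
      | none => []
      | some (x, R') => x :: selList key fuel R'

lemma find_min_spec (xs : List Int) (hne : xs ≠ []) :
    ∃ (p : Nat) (m : Int), find_min xs = some ((p : Int), m) ∧
      ∃ (hp : p < xs.length), xs[p] = m ∧ (∀ q (hq : q < p), xs[q]'(by omega) ≠ m) ∧ ∀ y ∈ xs, m ≤ y := by
  obtain ⟨x, t, rfl⟩ := List.exists_cons_of_ne_nil hne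
  have hfold : (PySem.List.pyRange 1 ((x::t).length : Int) 1).foldl
      (fun mv i => if PySem.List.pyGetD (x::t) i 0 < mv then PySem.List.pyGetD (x::t) i 0 else mv) x
      = t.foldl min x := by
    have h1 := PySem.List.foldl_pyRange_pyGetD' (x::t) 0 (fun mv v => if v < mv then v else mv) x (a := 1) (by norm_num)
    have h2 : ∀ (l : List Int) (a : Int), List.foldl (fun mv v => if v < mv then v else mv) a l = List.foldl min a l := by
      intro l
      induction l with
      | nil => intro a; rfl
      | cons y l ih =>
        intro a
        simp only [List.foldl_cons, ih]
        congr 1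
        simp [min_def]; omega
    simpa [h2] using h1
  set m := t.foldl min x with hm
  have hmem : m ∈ x :: t := by
    rcases PySem.List.foldl_min_mem t x with h | h
    · simp [hm, h]
    · simp [hm]; right; exact h
  have hle : ∀ y ∈ x :: t, m ≤ y := by
    intro y hy
    rcases List.mem_cons.mp hy with rfl | hy
    · exact (PySem.List.foldl_min_le t y).1
    · exact (PySem.List.foldl_min_le t x).2 y hy
  obtain ⟨p, hp'⟩ := Option.isSome_iff_exists.mp ((PySem.List.index?_isSome_iff (x::t) m).mpr hmem)
  obtain ⟨hp, hgp, hfirst⟩ := PySem.List.getElem_of_index?_eq_some hp'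
  refine ⟨p, m, ?_, hp, hgp, fun q hq => hfirst q hq, hle⟩
  simp only [find_min, PySem.List.pyGet?_zero_cons, hfold, hp']

lemma loopA_spec (deg dist : List Int) :
    ∀ (fuel : Nat) (R : List Int) (nd ns rest : List Int), R.length = fuel →
    loopA fuel nd ns (R.map (fun i => PySem.List.pyGetD deg i 0))
      ((R.map (fun i => PySem.List.pyGetD dist i 0)) ++ rest) =
      (nd ++ (selList (fun i => PySem.List.pyGetD deg i 0) fuel R).map (fun i => PySem.List.pyGetD deg i 0),
       ns ++ (selList (fun i => PySem.List.pyGetD deg i 0) fuel R).map (fun i => PySem.List.pyGetD dist i 0)) := by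
  intro fuel
  set g : Int → Int := fun i => PySem.List.pyGetD deg i 0 with hg
  set h : Int → Int := fun i => PySem.List.pyGetD dist i 0 with hh
  induction fuel with
  | zero =>
    intro R nd ns rest hlen
    rw [List.length_eq_zero_iff] at hlen
    subst hlen
    simp [loopA, selList]
  | succ fuel ih =>
    intro R nd ns rest hlen
    have hRne : R ≠ [] := by intro hc; subst hc; simp at hlen
    have hmapne : R.map g ≠ [] := by simpa using hRne
    obtain ⟨p, m, hfm, hp, hgp, hfirst, hle⟩ := find_min_spec (R.map g) hmapne
    have hpR : p < R.length := by simpa using hp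
    have hget1 : PySem.List.pyGet? (R.map g) (p : Int) = some ((R.map g)[p]'hp) := by
      rw [PySem.List.pyGet?_natCast]; simp [List.getElem?_eq_getElem hp]
    have hpop1 : PySem.List.pop? (R.map g) (p : Int) = some ((R.map g)[p]'hp, (R.map g).eraseIdx p) :=
      PySem.List.pop?_natCast _ p hp
    have hpts : p < (R.map h ++ rest).length := by simp; omega
    have hget2 : PySem.List.pyGet? (R.map h ++ rest) (p : Int) = some ((R.map h ++ rest)[p]'hpts) := by
      rw [PySem.List.pyGet?_natCast]; simp
    have hpop2 : PySem.List.pop? (R.map h ++ rest) (p : Int) = some ((R.map h ++ rest)[p]'hpts, (R.map h ++ rest).eraseIdx p) :=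
      PySem.List.pop?_natCast _ p hpts
    have hpopR : PySem.List.pop? R (p : Int) = some (R[p]'hpR, R.eraseIdx p) :=
      PySem.List.pop?_natCast _ p hpR
    have herase1 : (R.map g).eraseIdx p = (R.eraseIdx p).map g := List.eraseIdx_map g R p
    have herase2 : (R.map h ++ rest).eraseIdx p = (R.eraseIdx p).map h ++ rest := by
      rw [List.eraseIdx_append_of_lt_length (by simpa using hpR) rest, List.eraseIdx_map]
    have hval1 : (R.map g)[p]'hp = g (R[p]'hpR) := by simp
    have hval2 : (R.map h ++ rest)[p]'hpts = h (R[p]'hpR) := by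
      rw [List.getElem_append_left (by simpa using hpR)]; simp
    have hlen' : (R.eraseIdx p).length = fuel := by
      rw [List.length_eraseIdx_of_lt hpR]; omega
    have := ih (R.eraseIdx p) (nd ++ [g (R[p]'hpR)]) (ns ++ [h (R[p]'hpR)]) rest hlen'
    simp only [loopA, hfm, hget1, hpop1, hget2, hpop2, herase1, herase2, hval1, hval2]
    rw [this]
    simp only [selList, hfm, hpopR]
    simp

def lexlt (key : Int → Int) (i j : Int) : Prop := key i < key j ∨ (key i = key j ∧ i < j)

lemma selList_perm_pairwise (key : Int → Int) :
    ∀ (fuel : Nat) (R : List Int), R.length = fuel → R.Pairwise (· < ·) →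
      (selList key fuel R).Perm R ∧ (selList key fuel R).Pairwise (lexlt key) := by
  intro fuel
  induction fuel with
  | zero =>
    intro R hlen _
    rw [List.length_eq_zero_iff] at hlen
    subst hlen
    simp [selList]
  | succ fuel ih =>
    intro R hlen hR
    have hRne : R ≠ [] := by intro hc; subst hc; simp at hlen
    have hmapne : R.map key ≠ [] := by simpa using hRne
    obtain ⟨p, m, hfm, hp, hgp, hfirst, hle⟩ := find_min_spec (R.map key) hmapne
    have hpR : p < R.length := by simpa using hp
    have hpopR : PySem.List.pop? R (p : Int) = some (R[p]'hpR, R.eraseIdx p) :=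
      PySem.List.pop?_natCast _ p hpR
    have hsel : selList key (fuel + 1) R = R[p]'hpR :: selList key fuel (R.eraseIdx p) := by
      simp only [selList, hfm, hpopR]
    have hlen' : (R.eraseIdx p).length = fuel := by
      rw [List.length_eraseIdx_of_lt hpR]; omega
    obtain ⟨ihp, ihpw⟩ := ih (R.eraseIdx p) hlen' (hR.eraseIdx p)
    have hkm : key (R[p]'hpR) = m := by simpa using hgp
    -- the pick is the lexicographic minimum of R among the remaining elements
    have hmin : ∀ r ∈ R.eraseIdx p, lexlt key (R[p]'hpR) r := by
      intro r hr
      obtain ⟨q, hq, hrq⟩ := List.mem_iff_getElem.mp hr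
      rw [List.getElem_eraseIdx] at hrq
      have hler : m ≤ key r := by
        apply hle
        have : r ∈ R := List.eraseIdx_subset hr
        exact List.mem_map_of_mem this
      rcases lt_or_eq_of_le hler with hlt | heq
      · exact Or.inl (by omega)
      · right
        refine ⟨by omega, ?_⟩
        split at hrq
        · exfalso
          apply hfirst q (by omega)
          subst hrq
          simp [← heq]
        · have hq1 : p < q + 1 := by omega
          have hq1len : q + 1 < R.length := by
            have := List.length_eraseIdx_of_lt hpR
            omega
          have := List.pairwise_iff_getElem.mp hR p (q+1) hpR hq1len hq1
          omega
    refine ⟨?_, ?_⟩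
    · rw [hsel]
      exact (ihp.cons _).trans (List.getElem_cons_eraseIdx_perm hpR)
    · rw [hsel, List.pairwise_cons]
      exact ⟨fun r hr => hmin r (ihp.subset hr), ihpw⟩

lemma lex_unique (key : Int → Int) (l₁ l₂ : List Int) (hperm : l₁.Perm l₂)
    (h₁ : l₁.Pairwise (lexlt key)) (h₂ : l₂.Pairwise (lexlt key)) : l₁ = l₂ := by
  refine @List.Perm.eq_of_pairwise' Int (lexlt key) ⟨?_⟩ l₁ l₂ h₁ h₂ hperm
  intro a b hab hba
  rcases hab with h | ⟨e, h⟩ <;> rcases hba with h' | ⟨e', h'⟩ <;> omega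

lemma insertBy_lex (key : Int → Int) (x : Int) :
    ∀ (ys : List Int), ys.Pairwise (lexlt key) → (∀ y ∈ ys, y < x) →
      (PySem.List.insertBy (fun a b => decide (key a < key b)) x ys).Pairwise (lexlt key) := by
  intro ys
  induction ys with
  | nil => intro _ _; simp [PySem.List.insertBy, lexlt]
  | cons y ys ih =>
    intro h1 h2
    show List.Pairwise _ (if decide (key x < key y) then x :: y :: ys else
      y :: PySem.List.insertBy (fun a b => decide (key a < key b)) x ys)
    rw [List.pairwise_cons] at h1
    split
    · rename_i hxy
      rw [decide_eq_true_iff] at hxy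
      rw [List.pairwise_cons]
      refine ⟨?_, List.pairwise_cons.mpr h1⟩
      intro z hz
      rcases List.mem_cons.mp hz with rfl | hz
      · exact Or.inl hxy
      · have := h1.1 z hz
        left
        rcases this with h | ⟨e, _⟩ <;> omega
    · rename_i hxy
      rw [decide_eq_true_iff] at hxy
      rw [List.pairwise_cons]
      refine ⟨?_, ih h1.2 (fun z hz => h2 z (List.mem_cons_of_mem y hz))⟩
      intro z hz
      rcases (PySem.List.mem_insertBy _ x z ys).mp hz with rfl | hz
      · rcases lt_or_eq_of_le (not_lt.mp hxy) with h | h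
        · exact Or.inl h
        · exact Or.inr ⟨h, h2 y (List.mem_cons_self)⟩
      · exact h1.1 z hz

lemma foldl_insertBy_lex (key : Int → Int) :
    ∀ (l acc : List Int), l.Pairwise (· < ·) → acc.Pairwise (lexlt key) →
      (∀ y ∈ acc, ∀ x ∈ l, y < x) →
      (l.foldl (fun acc x => PySem.List.insertBy (fun a b => decide (key a < key b)) x acc) acc).Pairwise (lexlt key) := by
  intro l
  induction l with
  | nil => intro acc _ h _; simpa using h
  | cons x l ih =>
    intro acc hl hacc hsep
    rw [List.pairwise_cons] at hl
    simp only [List.foldl_cons]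
    apply ih _ hl.2 (insertBy_lex key x acc hacc (fun y hy => hsep y hy x List.mem_cons_self))
    intro y hy z hz
    rcases (PySem.List.mem_insertBy _ x y acc).mp hy with rfl | hy
    · exact hl.1 z hz
    · exact hsep y hy z (List.mem_cons_of_mem x hz)

lemma sorted_pairwise_lexlt (key : Int → Int) (l : List Int) (hl : l.Pairwise (· < ·)) :
    (PySem.List.sorted l key false).Pairwise (lexlt key) := by
  rw [PySem.List.sorted_eq_foldl_insertBy]
  exact foldl_insertBy_lex key l [] hl (by simp) (by simp)

-- ===== VERDICT (by name: the statement is the Claim_ definition above) =====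
theorem arrage_2array_increase_spec : Claim_equal_arrage_2array_increase := by
  intro deg dist _hdom hpre
  have hpre' : deg.length ≤ dist.length := hpre
  show arrage_2array_increase deg dist = arrage_2array_increase_alt deg dist
  set g : Int → Int := fun i => PySem.List.pyGetD deg i 0 with hg
  set h : Int → Int := fun i => PySem.List.pyGetD dist i 0 with hh
  set R0 : List Int := PySem.List.pyRange 0 (deg.length : Int) 1 with hR0
  have hlenR0 : R0.length = deg.length := by
    rw [hR0, PySem.List.length_pyRange_one]; omega
  have hdeg : R0.map g = deg := by
    simpa using PySem.List.map_pyGetD_pyRange_zero deg 0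
  have htake : R0.map h = dist.take deg.length := by
    apply List.ext_getElem
    · simp [hlenR0]; omega
    · intro k hk1 hk2
      have hkn : k < deg.length := by simpa [hlenR0] using hk1
      have hkd : k < dist.length := by omega
      rw [List.getElem_map, List.getElem_take]
      simp only [hR0, hh, PySem.List.getElem_pyRange_one]
      rw [show ((0:Int) + (k:Int)) = ((k:Nat):Int) by omega, PySem.List.pyGetD_natCast]
      simp [List.getD, List.getElem?_eq_getElem hkd]
  have hdist : R0.map h ++ dist.drop deg.length = dist := by
    rw [htake, List.take_append_drop]
  have hpw : R0.Pairwise (· < ·) := PySem.List.pairwise_lt_pyRange_one 0 _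
  obtain ⟨hperm, hpwsel⟩ := selList_perm_pairwise g deg.length R0 hlenR0 hpw
  have hA : arrage_2array_increase deg dist =
      ((selList g deg.length R0).map g, (selList g deg.length R0).map h) := by
    have := loopA_spec deg dist deg.length R0 [] [] (dist.drop deg.length) hlenR0
    rw [hdeg, hdist] at this
    simpa [arrage_2array_increase] using this
  have hordpw : (PySem.List.sorted R0 g false).Pairwise (lexlt g) := sorted_pairwise_lexlt g R0 hpw
  have heq : selList g deg.length R0 = PySem.List.sorted R0 g false :=
    lex_unique g _ _ (hperm.trans (PySem.List.sorted_perm R0 g false).symm) hpwsel hordpw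
  rw [hA, heq]
  rfl
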